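-- pv_equiv track=rewrite | github.com/venkateswarlu589/GeeksForGeeks-Solutions | Medium/Find the element that appears once/find-the-element-that-appears-once.py | search
-- ===== SOURCE A (Python) =====
-- def search(A, N):
--     # your code here
--     hashmap = {}
--     for i in range(len(A)):
--         if A[i] not in hashmap:
--             hashmap[A[i]] = 1
--         else:
--             hashmap[A[i]] += 1
--     for key,val in hashmap.items():
--         if val == 1:
--             return key
-- ===== SOURCE B (Python) =====
-- def search(A, N):
--     checked = set()
--     for x in A:
--         if x in checked:
--             continue
--         if A.count(x) == 1:
--             return x
--         checked.add(x)
-- ===== Notes on version B (the rewrite author's own statement) =====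
-- stated objective: alternative
-- what changed: drops the hash-count pass and the dict items scan: a single loop over A returns the first element whose A.count(x) is 1, rescanning A per distinct prefix value instead of maintaining counts
-- outside the precondition, e.g. on search([2, 2], 0): A returns None, B returns None
import Mathlib
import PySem

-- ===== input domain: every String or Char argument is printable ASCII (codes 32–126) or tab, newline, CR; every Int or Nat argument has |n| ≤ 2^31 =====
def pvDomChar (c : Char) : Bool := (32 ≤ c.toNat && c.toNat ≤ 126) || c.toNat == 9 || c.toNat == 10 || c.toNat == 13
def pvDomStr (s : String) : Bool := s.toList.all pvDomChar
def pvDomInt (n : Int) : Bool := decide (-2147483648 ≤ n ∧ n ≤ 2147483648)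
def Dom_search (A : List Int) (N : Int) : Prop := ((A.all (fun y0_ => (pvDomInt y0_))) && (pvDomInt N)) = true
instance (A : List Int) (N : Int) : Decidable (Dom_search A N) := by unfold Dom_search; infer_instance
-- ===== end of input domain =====

-- B drops the hash-count pass and the dict scan: one loop over A returning the first
-- element whose A.count(x) is 1, rescanning A per new distinct value; not faster.

-- ===== PORT A =====
def search (A : List Int) (_N : Int) : Int :=
  let hashmap : PySem.Dict Int Int :=
    (PySem.List.pyRange 0 (PySem.List.len A) 1).foldl
      (fun h i =>
        if !(h.contains (PySem.List.pyGetD A i 0)) then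
          h.insert (PySem.List.pyGetD A i 0) 1
        else
          h.insert (PySem.List.pyGetD A i 0) (h.getD (PySem.List.pyGetD A i 0) 0 + 1))
      PySem.Dict.empty
  match hashmap.items.find? (fun kv => kv.2 == 1) with
  | some kv => kv.1
  | none => 0   -- Python falls off the end and returns None here; excluded by Pre_search

-- ===== PORT B =====
def searchAltLoop (A : List Int) : List Int → PySem.Set Int → Option Int
  | [], _ => none
  | x :: t, checked =>
    if PySem.Set.contains checked x then searchAltLoop A t checked
    else if ((PySem.List.count A x : Int) == 1) then some x
    else searchAltLoop A t (PySem.Set.add checked x)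

def search_alt (A : List Int) (_N : Int) : Int :=
  match searchAltLoop A A PySem.Set.empty with
  | some x => x
  | none => 0   -- unreachable under Pre_search

-- ===== PRECONDITION & SPEC =====
-- Pre_ excludes exactly the inputs where no element occurs exactly once: there the Python A
-- falls off the end of its second loop and returns None, which is not an int.
def Pre_search (A : List Int) (N : Int) : Prop :=
  (A.any (fun x => A.count x == 1)) = true
instance (A : List Int) (N : Int) : Decidable (Pre_search A N) := by
  unfold Pre_search; infer_instance

def pvWitness_search : List Int × Int := ([2, 2, 5, 2], 4)

def Spec_search (A : List Int) (N : Int) (out : Int) : Prop := out = search_alt A N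
instance (A : List Int) (N : Int) (out : Int) : Decidable (Spec_search A N out) := by
  unfold Spec_search; infer_instance

-- ===== CLAIM (what is proved, stated in full; the proofs are below) =====
def Claim_equal_search : Prop :=
  ∀ (A : List Int) (N : Int), Dom_search A N → Pre_search A N → Spec_search A N (search A N)

-- ===== LEMMAS AND PROOFS =====

-- find? over a Set built by folding add scans the accumulator first, then the new elements.
theorem find?_foldl_set_add (p : Int → Bool) (t : List Int) (s : PySem.Set Int) :
    (t.foldl PySem.Set.add s).find? p = (s ++ t).find? p := by
  induction t generalizing s with
  | nil => simp
  | cons a t ih =>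
      simp only [List.foldl_cons]
      rw [ih]
      by_cases hmem : PySem.Set.contains s a = true
      · have hadd : PySem.Set.add s a = s := by
          simp only [PySem.Set.add]; rw [if_pos hmem]
        rw [hadd]
        rcases hfs : s.find? p with _ | y
        · have hpa : p a = false := by
            have := List.find?_eq_none.mp hfs a ((PySem.Set.contains_iff s a).mp hmem)
            simpa using this
          simp [List.find?_append, hfs, hpa]
        · simp [List.find?_append, hfs]
      · have hadd : PySem.Set.add s a = s ++ [a] := by
          simp only [PySem.Set.add]; rw [if_neg hmem]
        rw [hadd, List.append_assoc]
        rfl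

-- A's dict loop is the Counter loop
theorem search_dict_eq_counter (A : List Int) :
    (PySem.List.pyRange 0 (PySem.List.len A) 1).foldl
      (fun (h : PySem.Dict Int Int) i =>
        if !(h.contains (PySem.List.pyGetD A i 0)) then
          h.insert (PySem.List.pyGetD A i 0) 1
        else
          h.insert (PySem.List.pyGetD A i 0) (h.getD (PySem.List.pyGetD A i 0) 0 + 1))
      PySem.Dict.empty
    = PySem.Dict.counter A := by
  rw [PySem.List.foldl_pyRange_zero_pyGetD A 0
      (fun (h : PySem.Dict Int Int) x =>
        if !(h.contains x) then h.insert x 1 else h.insert x (h.getD x 0 + 1))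
      PySem.Dict.empty]
  rw [← PySem.Dict.foldl_insert_getD_add_one_eq_counter]
  apply PySem.List.foldl_congr_mem
  intro acc x _
  by_cases hc : acc.contains x = true
  · simp [hc]
  · have : acc.getD x 0 = 0 :=
      PySem.Dict.getD_of_not_contains _ _ (by simpa using hc)
    simp [hc, this]

-- B's loop with a `checked` set of already-refuted values is find? over the rest
theorem searchAltLoop_eq_find? (A : List Int) (l : List Int) (checked : PySem.Set Int)
    (h : ∀ y ∈ checked, ((PySem.List.count A y : Int) == 1) = false) :
    searchAltLoop A l checked = l.find? (fun x => ((PySem.List.count A x : Int) == 1)) := by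
  induction l generalizing checked with
  | nil => rfl
  | cons x t ih =>
      unfold searchAltLoop
      by_cases hc : PySem.Set.contains checked x = true
      · rw [if_pos hc, ih checked h,
          List.find?_cons_of_neg (p := fun x => ((PySem.List.count A x : Int) == 1)) (by have := h x ((PySem.Set.contains_iff checked x).mp hc); simp at this ⊢; omega)]
      · rw [if_neg hc]
        by_cases hp : ((PySem.List.count A x : Int) == 1) = true
        · rw [if_pos hp, List.find?_cons_of_pos (p := fun x => ((PySem.List.count A x : Int) == 1)) hp]
        · rw [if_neg hp, List.find?_cons_of_neg (p := fun x => ((PySem.List.count A x : Int) == 1)) (by simpa using hp)]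
          exact ih _ (by
            intro y hy
            rcases (PySem.Set.mem_add checked x y).mp hy with hy' | hy'
            · exact h y hy'
            · subst hy'; simpa using hp)

-- ===== VERDICT (by name: the statement is the Claim_ definition above) =====
theorem search_spec : Claim_equal_search := by
  intro A N _ _
  unfold Spec_search search search_alt
  simp only [search_dict_eq_counter, PySem.Dict.items_counter]
  rw [List.find?_map]
  rw [show (PySem.Set.ofList A) = (A.foldl PySem.Set.add PySem.Set.empty) from
    PySem.Set.ofList_eq_foldl A]
  rw [find?_foldl_set_add]
  rw [show (PySem.Set.empty : PySem.Set Int) ++ A = A from rfl]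
  have hp : (fun x => ((Function.comp (fun kv : Int × Int => kv.2 == 1)
        (fun k => (k, ((List.count k A : Int)))) x)))
      = (fun x => ((PySem.List.count A x : Int) == 1)) := by
    funext x
    simp [Function.comp, PySem.List.count_eq]
  rw [show (A.find? ((fun kv : Int × Int => kv.2 == 1) ∘ fun k => (k, (List.count k A : Int))))
      = A.find? (fun x => ((PySem.List.count A x : Int) == 1)) from by rw [← hp]]
  rw [searchAltLoop_eq_find? A A PySem.Set.empty (by intro y hy; cases hy)]
  rcases hf : A.find? (fun x => ((PySem.List.count A x : Int) == 1)) with _ | v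
  · rfl
  · rfl
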